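-- pv_equiv track=rewrite | github.com/TitanicThompson1/FPRO | Play/rangoli.py | rangoli
-- ===== SOURCE A (Python) =====
-- def rangoli(N):
--
--     wide=4*N-3
--     lenght=2*N-1
--     alphabet="abcdefghijklmnopqrstuvwxyz"
--     alphabet=alphabet[:N]+(N-1)*"-"
--     resultlinha=""
--     result=""
--
--     for i in range((lenght+1)//2):
--
--         for j in range((wide+1)//2):
--
--             if j%2==0:
--                 resultlinha+=alphabet[int(-i-(j/2))-1]
--                 result+=alphabet[int(-i-(j/2))-1]
--
--             else:
--                 resultlinha+="-"
--                 result+="-"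
--
--
--         umastring=resultlinha[::-1]
--         result+=umastring[1:]
--         result+="\n"
--         resultlinha=""
--
--
--     for i in range(((lenght+1)//2)-2,-1,-1):
--
--         for j in range((wide+1)//2):
--
--             if j%2==0:
--                 resultlinha+=alphabet[int(-i-(j/2))-1]
--                 result+=alphabet[int(-i-(j/2))-1]
--
--             else:
--                 resultlinha+="-"
--                 result+="-"
--
--         umastring=resultlinha[::-1]
--         result+=umastring[1:]
--         result+="\n"
--         resultlinha=""
--
--     return result
-- ===== SOURCE B (Python) =====
-- def rangoli(N):
--     alpha = "abcdefghijklmnopqrstuvwxyz"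
--     width = 4 * N - 3
--     top = ['-'.join(alpha[N-1:i:-1] + alpha[i:N]).center(width, '-')
--            for i in range(N - 1, -1, -1)]
--     rows = top + top[-2::-1]
--     return ''.join(r + '\n' for r in rows)
-- ===== Notes on version B (the rewrite author's own statement) =====
-- stated objective: idiomatic
-- what changed: B builds each row as a whole string (reversed-slice + slice of the alphabet joined with '-', then centered to width 4*N-3) and mirrors the list of top rows, instead of A's character-by-character nested loops with negative-index arithmetic and an explicit reflection of each half line.
-- outside the precondition, e.g. on rangoli(27): A raises IndexError
import Mathlib
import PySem

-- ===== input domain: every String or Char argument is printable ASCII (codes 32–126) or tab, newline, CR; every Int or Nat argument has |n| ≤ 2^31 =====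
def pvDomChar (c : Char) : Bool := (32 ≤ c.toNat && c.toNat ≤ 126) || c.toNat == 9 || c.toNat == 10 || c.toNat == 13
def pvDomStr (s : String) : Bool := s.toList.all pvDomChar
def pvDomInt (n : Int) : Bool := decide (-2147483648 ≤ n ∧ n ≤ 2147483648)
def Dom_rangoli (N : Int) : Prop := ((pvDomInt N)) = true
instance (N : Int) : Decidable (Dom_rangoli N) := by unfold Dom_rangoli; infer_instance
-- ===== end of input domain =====

-- B builds each rangoli row by whole-string slice/join/center operations and mirrors the row list,
-- replacing A's character-by-character negative-index loops (objective: idiomatic).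

-- ===== PORT A =====
-- alphabet = alphabet[:N] + (N-1)*"-"  (string repetition: empty for N-1 ≤ 0; exact)
def pvAlphabet (N : Int) : List Char :=
  PySem.List.slice "abcdefghijklmnopqrstuvwxyz".toList none (some N)
    ++ List.flatten (List.replicate (N - 1).toNat ['-'])

-- A's two for-loops have the SAME body, written out twice in the Python; `pvABody` is that shared body.
-- `alphabet[int(-i-(j/2))-1]`: j is even in that branch, so the float division is exact and the index
-- is the integer -i - j//2 - 1; under Pre_rangoli it is always in range (pyGetD's default unreachable).
def pvABody (wide : Int) (alphabet : List Char) (result : List Char) (i : Int) : List Char :=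
  let st :=
    (PySem.List.pyRange 0 (PySem.Int.floordiv (wide + 1) 2) 1).foldl
      (fun (st : List Char × List Char) j =>
        if PySem.Int.mod j 2 = 0 then
          let c := PySem.List.pyGetD alphabet (-i - PySem.Int.floordiv j 2 - 1) ' '
          (st.1 ++ [c], st.2 ++ [c])
        else
          (st.1 ++ ['-'], st.2 ++ ['-']))
      (([] : List Char), result)
  let umastring := (PySem.List.slice? st.1 none none (-1)).getD []  -- resultlinha[::-1]; step ≠ 0, never none
  st.2 ++ PySem.List.slice umastring (some 1) none ++ ['\n']        -- result += umastring[1:]; result += "\n"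

def rangoliChars (N : Int) : List Char :=
  let wide : Int := 4 * N - 3
  let lenght : Int := 2 * N - 1
  let alphabet : List Char := pvAlphabet N
  let result :=
    (PySem.List.pyRange 0 (PySem.Int.floordiv (lenght + 1) 2) 1).foldl (pvABody wide alphabet) []
  let result :=
    (PySem.List.pyRange (PySem.Int.floordiv (lenght + 1) 2 - 2) (-1) (-1)).foldl (pvABody wide alphabet) result
  result

def rangoli (N : Int) : String := String.ofList (rangoliChars N)

-- ===== PORT B =====
-- exact port of CPython's str.center fill rule: marg = width - len; left = marg//2 + (marg & width & 1)
def pvCenter (cs : List Char) (w : Int) (f : Char) : List Char :=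
  let marg := w - (cs.length : Int)
  if marg ≤ 0 then cs
  else
    let left := PySem.Int.floordiv marg 2 + PySem.Int.band (PySem.Int.band marg w) 1
    List.replicate left.toNat f ++ cs ++ List.replicate (marg - left).toNat f

def rangoliAltChars (N : Int) : List Char :=
  let alpha : List Char := "abcdefghijklmnopqrstuvwxyz".toList
  let width : Int := 4 * N - 3
  let top :=
    (PySem.List.pyRange (N - 1) (-1) (-1)).map (fun i =>
      let letters :=
        ((PySem.List.slice? alpha (some (N - 1)) (some i) (-1)).getD [])  -- alpha[N-1:i:-1]; step ≠ 0, never none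
          ++ PySem.List.slice alpha (some i) (some N)                     -- alpha[i:N]
      pvCenter (PySem.Chars.join ['-'] (letters.map (fun c => [c]))) width '-')
  let rows := top ++ ((PySem.List.slice? top (some (-2)) none (-1)).getD [])  -- top[-2::-1]
  (rows.map (fun r => r ++ ['\n'])).flatten  -- ''.join(r + '\n' for r in rows)

def rangoli_alt (N : Int) : String := String.ofList (rangoliAltChars N)

-- ===== PRECONDITION & SPEC =====
-- Pre_ excludes N ≥ 27, where A raises IndexError (its padded alphabet is too short); A returns on every N ≤ 26.
def Pre_rangoli (N : Int) : Prop := N ≤ 26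
instance (N : Int) : Decidable (Pre_rangoli N) := by unfold Pre_rangoli; infer_instance
def pvWitness_rangoli : Int := (3)

def Spec_rangoli (N : Int) (out : String) : Prop := out = rangoli_alt N
instance (N : Int) (out : String) : Decidable (Spec_rangoli N out) := by unfold Spec_rangoli; infer_instance

-- ===== CLAIM (what is proved, stated in full; the proofs are below) =====
def Claim_equal_rangoli : Prop := ∀ (N : Int), Dom_rangoli N → Pre_rangoli N → Spec_rangoli N (rangoli N)

-- ===== LEMMAS AND PROOFS =====

-- the character A's inner loop appends at position j (to both resultlinha and result)
def pvH (alphabet : List Char) (i j : Int) : List Char :=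
  if PySem.Int.mod j 2 = 0 then
    [PySem.List.pyGetD alphabet (-i - PySem.Int.floordiv j 2 - 1) ' ']
  else ['-']

-- the complete line A's loop body appends to result for row i
def pvRow (wide : Int) (alphabet : List Char) (i : Int) : List Char :=
  let linha := (PySem.List.pyRange 0 (PySem.Int.floordiv (wide + 1) 2) 1).flatMap (pvH alphabet i)
  linha ++ PySem.List.slice ((PySem.List.slice? linha none none (-1)).getD []) (some 1) none ++ ['\n']

theorem foldl_pair_append (h : Int → List Char) (js : List Int) :
    ∀ (a b : List Char),
      js.foldl (fun st j => (st.1 ++ h j, st.2 ++ h j)) (a, b) = (a ++ js.flatMap h, b ++ js.flatMap h) := by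
  induction js with
  | nil => simp
  | cons j js ih => intro a b; simp [List.foldl_cons, ih]

theorem pvABody_eq (w : Int) (al : List Char) (res : List Char) (i : Int) :
    pvABody w al res i = res ++ pvRow w al i := by
  unfold pvABody pvRow
  rw [show (fun (st : List Char × List Char) j =>
        if PySem.Int.mod j 2 = 0 then
          let c := PySem.List.pyGetD al (-i - PySem.Int.floordiv j 2 - 1) ' '
          (st.1 ++ [c], st.2 ++ [c])
        else (st.1 ++ ['-'], st.2 ++ ['-']))
      = (fun (st : List Char × List Char) j => (st.1 ++ pvH al i j, st.2 ++ pvH al i j)) from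
    funext fun st => funext fun j => by unfold pvH; split_ifs <;> rfl]
  rw [foldl_pair_append]
  simp

theorem foldl_pvABody (w : Int) (al : List Char) (l : List Int) (acc : List Char) :
    l.foldl (pvABody w al) acc = acc ++ l.flatMap (pvRow w al) := by
  rw [PySem.List.foldl_congr_mem l (pvABody w al) (fun acc i => acc ++ pvRow w al i) acc
        (fun acc i _ => pvABody_eq w al acc i),
      PySem.List.foldl_append_eq_flatMap]

theorem rangoliChars_eq (N : Int) :
    rangoliChars N =
      (PySem.List.pyRange 0 (PySem.Int.floordiv (2 * N - 1 + 1) 2) 1).flatMap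
          (pvRow (4 * N - 3) (pvAlphabet N))
        ++ (PySem.List.pyRange (PySem.Int.floordiv (2 * N - 1 + 1) 2 - 2) (-1) (-1)).flatMap
          (pvRow (4 * N - 3) (pvAlphabet N)) := by
  simp only [rangoliChars, foldl_pvABody, List.nil_append]

-- B's list `rows` (top + mirrored top), as a named term for row-by-row comparison
def pvRowsB (N : Int) : List (List Char) :=
  let alpha : List Char := "abcdefghijklmnopqrstuvwxyz".toList
  let width : Int := 4 * N - 3
  let top :=
    (PySem.List.pyRange (N - 1) (-1) (-1)).map (fun i =>
      let letters :=
        ((PySem.List.slice? alpha (some (N - 1)) (some i) (-1)).getD [])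
          ++ PySem.List.slice alpha (some i) (some N)
      pvCenter (PySem.Chars.join ['-'] (letters.map (fun c => [c]))) width '-')
  top ++ ((PySem.List.slice? top (some (-2)) none (-1)).getD [])

theorem altChars_eq (N : Int) :
    rangoliAltChars N = ((pvRowsB N).map (fun r => r ++ ['\n'])).flatten := rfl

theorem floordiv_2N (N : Int) : PySem.Int.floordiv (2 * N - 1 + 1) 2 = N := by
  rw [PySem.Int.floordiv_eq_iff_of_pos (by omega)]; omega

theorem chars_eq_of_rows (N : Int)
    (h : (PySem.List.pyRange 0 N 1 ++ PySem.List.pyRange (N - 2) (-1) (-1)).map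
           (pvRow (4 * N - 3) (pvAlphabet N))
         = (pvRowsB N).map (fun r => r ++ ['\n'])) :
    rangoliChars N = rangoliAltChars N := by
  rw [rangoliChars_eq, floordiv_2N, ← List.flatMap_append, List.flatMap_def, h, ← altChars_eq]

set_option maxRecDepth 20000 in
set_option maxHeartbeats 4000000 in
theorem chars_eq (N : Int) (hPre : N ≤ 26) : rangoliChars N = rangoliAltChars N := by
  apply chars_eq_of_rows
  by_cases h1 : 1 ≤ N
  · interval_cases N <;> decide
  · rw [PySem.List.pyRange_one_eq_nil (by omega : N ≤ 0),
        PySem.List.pyRange_neg_one_eq_nil (by omega : N - 2 ≤ -1)]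
    unfold pvRowsB
    rw [PySem.List.pyRange_neg_one_eq_nil (by omega : N - 1 ≤ -1)]
    rfl

-- ===== VERDICT (by name: the statement is the Claim_ definition above) =====
theorem rangoli_spec : Claim_equal_rangoli := by
  intro N _ hPre
  unfold Spec_rangoli rangoli rangoli_alt
  exact congrArg String.ofList (chars_eq N hPre)
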